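-- pv_equiv track=rewrite | github.com/databricks-solutions/project-0xfffff | server/routers/discovery.py | _iter_sse_data_payloads
-- ===== SOURCE A (Python) =====
-- def _iter_sse_data_payloads(chunk: str) -> list[str]:
--     normalized = chunk.replace("\r\n", "\n")
--     payloads: list[str] = []
--     for raw_event in normalized.split("\n\n"):
--         raw_event = raw_event.strip()
--         if not raw_event:
--             continue
--         lines = [line.strip() for line in raw_event.split("\n") if line.strip().startswith("data:")]
--         if not lines:
--             continue
--         payload = "\n".join(line[5:].strip() for line in lines)
--         if payload:
--             payloads.append(payload)
--     return payloads
-- ===== SOURCE B (Python) =====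
-- def _iter_sse_data_payloads(chunk: str) -> list[str]:
--     # Single pass over lines with an accumulator, instead of splitting into
--     # events and re-splitting each event.
--     payloads: list[str] = []
--     current: list[str] = []
--
--     def flush() -> None:
--         payload = "\n".join(current)
--         if payload:
--             payloads.append(payload)
--         current.clear()
--
--     for line in chunk.replace("\r\n", "\n").split("\n"):
--         if not line:
--             flush()
--         else:
--             stripped = line.strip()
--             if stripped.startswith("data:"):
--                 current.append(stripped[5:].strip())
--     flush()
--     return payloads
-- ===== Notes on version B (the rewrite author's own statement) =====
-- stated objective: alternative
-- what changed: Replaces the nested split (chunk cut into double-newline-separated events, each event re-split into lines with per-event strip/filter/join) by a single pass over the newline-split lines that maintains a payload-fragment accumulator and flushes it at blank-line event boundaries.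
import Mathlib
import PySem

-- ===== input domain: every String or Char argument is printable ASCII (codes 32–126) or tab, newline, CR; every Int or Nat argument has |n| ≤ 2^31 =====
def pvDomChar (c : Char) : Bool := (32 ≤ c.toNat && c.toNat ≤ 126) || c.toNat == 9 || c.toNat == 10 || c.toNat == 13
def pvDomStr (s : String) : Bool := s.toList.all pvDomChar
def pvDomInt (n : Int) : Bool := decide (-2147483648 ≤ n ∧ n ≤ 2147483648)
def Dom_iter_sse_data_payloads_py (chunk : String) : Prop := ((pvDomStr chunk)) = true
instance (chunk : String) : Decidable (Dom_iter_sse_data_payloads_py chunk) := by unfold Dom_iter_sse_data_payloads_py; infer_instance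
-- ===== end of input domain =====

-- B replaces the nested split (events on "\n\n", then lines per event) by a single pass over the
-- "\n"-split lines with an accumulator flushed at blank-line boundaries; same output, same cost.

-- ===== PORT A =====
def iter_sse_data_payloads_py (chunk : String) : List String :=
  let normalized := PySem.Chars.replace chunk.toList ['\r', '\n'] ['\n']
  let payloads := (PySem.Chars.splitOn normalized ['\n', '\n']).foldl (fun payloads rawEvent =>
    let rawEvent := PySem.Chars.strip rawEvent
    if rawEvent = [] then payloads
    else
      let lines := ((PySem.Chars.splitOn rawEvent ['\n']).filter
          (fun line => PySem.Chars.startswith (PySem.Chars.strip line) ['d','a','t','a',':'])).map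
          (fun line => PySem.Chars.strip line)
      if lines = [] then payloads
      else
        let payload := PySem.Chars.join ['\n']
          (lines.map (fun line => PySem.Chars.strip (PySem.Chars.slice line (some 5) none)))
        if payload = [] then payloads else payloads ++ [payload]) []
  payloads.map String.ofList

-- ===== PORT B =====
def sseFlushAlt (st : List (List Char) × List (List Char)) :
    List (List Char) × List (List Char) :=
  let payload := PySem.Chars.join ['\n'] st.2
  (if payload = [] then st.1 else st.1 ++ [payload], [])

def sseStepAlt (st : List (List Char) × List (List Char)) (line : List Char) :
    List (List Char) × List (List Char) :=
  if line = [] then sseFlushAlt st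
  else
    let stripped := PySem.Chars.strip line
    if PySem.Chars.startswith stripped ['d','a','t','a',':'] then
      (st.1, st.2 ++ [PySem.Chars.strip (PySem.Chars.slice stripped (some 5) none)])
    else st

def iter_sse_data_payloads_py_alt (chunk : String) : List String :=
  let st := (PySem.Chars.splitOn (PySem.Chars.replace chunk.toList ['\r', '\n'] ['\n'])
      ['\n']).foldl sseStepAlt ([], [])
  (sseFlushAlt st).1.map String.ofList


-- ===== PRECONDITION & SPEC =====
def Spec_iter_sse_data_payloads_py (chunk : String) (out : List String) : Prop := out = iter_sse_data_payloads_py_alt chunk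
instance (chunk : String) (out : List String) : Decidable (Spec_iter_sse_data_payloads_py chunk out) := by unfold Spec_iter_sse_data_payloads_py; infer_instance

-- ===== CLAIM (what is proved, stated in full; the proofs are below) =====
def Claim_equal_iter_sse_data_payloads_py : Prop := ∀ (chunk : String), Dom_iter_sse_data_payloads_py chunk → Spec_iter_sse_data_payloads_py chunk (iter_sse_data_payloads_py chunk)

-- ===== LEMMAS AND PROOFS =====
-- ===== reference splitter =====
def splitRec (sep : List Char) : List Char → List (List Char)
  | [] => [[]]
  | c :: rest =>
    if sep.isPrefixOf (c :: rest) then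
      [] :: splitRec sep (List.drop (sep.length - 1) rest)
    else
      (splitRec sep rest).modifyHead (c :: ·)
termination_by l => l.length
decreasing_by
  · simp only [List.length_drop, List.length_cons]
    omega
  · simp

theorem modifyHead_fun_id {α : Type} (l : List α) :
    List.modifyHead (fun x => x) l = l := by
  cases l <;> simp

theorem splitRec_ne_nil (sep s : List Char) : splitRec sep s ≠ [] := by
  cases s with
  | nil => rw [splitRec]; simp
  | cons c rest =>
    rw [splitRec]
    by_cases hp : sep.isPrefixOf (c :: rest)
    · rw [if_pos hp]; simp
    · rw [if_neg hp]
      cases hsp : splitRec sep rest with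
      | nil => exact absurd hsp (splitRec_ne_nil sep rest)
      | cons hd tl => simp
termination_by s.length
decreasing_by simp

theorem go_eq (sep : List Char) (hsep : sep ≠ []) :
    ∀ fuel l cur acc, l.length < fuel →
      PySem.Chars.splitOn.go sep fuel l cur acc =
        acc.reverse ++ ((splitRec sep l).modifyHead (cur.reverse ++ ·)) := by
  intro fuel
  induction fuel with
  | zero => intro l cur acc h; omega
  | succ fuel ih =>
    intro l cur acc h
    cases l with
    | nil =>
      simp [PySem.Chars.splitOn.go, splitRec]
    | cons c rest =>
      rw [PySem.Chars.splitOn.go]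
      by_cases hp : sep.isPrefixOf (c :: rest)
      · rw [if_pos hp]
        obtain ⟨d, sep', rfl⟩ : ∃ d sep', sep = d :: sep' := by
          cases sep with | nil => exact absurd rfl hsep | cons d t => exact ⟨d, t, rfl⟩
        have hlen : (List.drop (d :: sep').length (c :: rest)).length < fuel := by
          simp [List.length_drop] at *; omega
        rw [ih _ _ _ hlen]
        rw [splitRec, if_pos hp]
        simp [modifyHead_fun_id]
      · rw [if_neg hp]
        have hlen : rest.length < fuel := by simp at h; omega
        rw [ih _ _ _ hlen]
        rw [splitRec, if_neg hp]
        cases hsp : splitRec sep rest with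
        | nil => exact absurd hsp (splitRec_ne_nil sep rest)
        | cons hd tl => simp

theorem splitOn_eq_splitRec (s sep : List Char) (hsep : sep ≠ []) :
    PySem.Chars.splitOn s sep = splitRec sep s := by
  rw [PySem.Chars.splitOn, go_eq sep hsep _ _ _ _ (by omega)]
  cases hsp : splitRec sep s with
  | nil => exact absurd hsp (splitRec_ne_nil sep s)
  | cons hd tl => simp

-- ===== abbreviations of the two fold bodies =====
def dF (l : List Char) : Option (List Char) :=
  if PySem.Chars.startswith (PySem.Chars.strip l) ['d','a','t','a',':'] then
    some (PySem.Chars.strip (PySem.Chars.slice (PySem.Chars.strip l) (some 5) none))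
  else none

def push (p fs : List (List Char)) : List (List Char) :=
  if PySem.Chars.join ['\n'] fs = [] then p else p ++ [PySem.Chars.join ['\n'] fs]

def frags (e : List Char) : List (List Char) := (splitRec ['\n'] e).filterMap dF

def preF (e : List Char) : List (List Char) := ((splitRec ['\n'] e).dropLast).filterMap dF

def lastL (e : List Char) : List Char := (splitRec ['\n'] e).getLastD []

def evA (payloads : List (List Char)) (rawEvent : List Char) : List (List Char) :=
  let rawEvent := PySem.Chars.strip rawEvent
  if rawEvent = [] then payloads
  else
    let lines := ((PySem.Chars.splitOn rawEvent ['\n']).filter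
        (fun line => PySem.Chars.startswith (PySem.Chars.strip line) ['d','a','t','a',':'])).map
        (fun line => PySem.Chars.strip line)
    if lines = [] then payloads
    else
      let payload := PySem.Chars.join ['\n']
        (lines.map (fun line => PySem.Chars.strip (PySem.Chars.slice line (some 5) none)))
      if payload = [] then payloads else payloads ++ [payload]

-- ===== small list lemmas =====
theorem MH_append {α : Type} (f : α → α) (X Y : List α) (h : X ≠ []) :
    List.modifyHead f (X ++ Y) = List.modifyHead f X ++ Y := by
  cases X with
  | nil => exact absurd rfl h
  | cons a t => simp

theorem MH_comp {α : Type} (f g : α → α) (l : List α) :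
    List.modifyHead f (List.modifyHead g l) = List.modifyHead (fun x => f (g x)) l := by
  cases l <;> simp

theorem FM_last {α β : Type} (f : α → Option β) (l : List α) (d : α) (h : l ≠ []) :
    List.filterMap f l = List.filterMap f l.dropLast ++ (f (l.getLastD d)).toList := by
  induction l with
  | nil => exact absurd rfl h
  | cons a t ih =>
    cases t with
    | nil => cases hf : f a <;> simp [List.filterMap, hf]
    | cons b t' =>
      have := ih (by simp)
      rw [List.filterMap_cons]
      cases hf : f a <;>
        simp only [List.dropLast_cons₂, List.getLastD_cons, List.filterMap_cons, hf, this] <;> simp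

-- ===== splitRec unfoldings for the two separators =====
theorem splitRec_nl_nil : splitRec ['\n'] [] = [[]] := by rw [splitRec]

theorem splitRec_nl_cons_nl (t : List Char) :
    splitRec ['\n'] ('\n' :: t) = [] :: splitRec ['\n'] t := by
  rw [splitRec, if_pos (by simp [List.isPrefixOf])]
  simp

theorem splitRec_nl_cons (c : Char) (t : List Char) (h : c ≠ '\n') :
    splitRec ['\n'] (c :: t) = (splitRec ['\n'] t).modifyHead (c :: ·) := by
  rw [splitRec, if_neg]
  simp [List.isPrefixOf]
  exact fun hh => h hh.symm

theorem splitRec_nl2_nil : splitRec ['\n','\n'] [] = [[]] := by rw [splitRec]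

theorem splitRec_nl2_cons2 (t : List Char) :
    splitRec ['\n','\n'] ('\n' :: '\n' :: t) = [] :: splitRec ['\n','\n'] t := by
  rw [splitRec, if_pos (by simp [List.isPrefixOf])]
  simp

theorem splitRec_nl2_cons (c : Char) (t : List Char)
    (h : ¬ (['\n','\n'].isPrefixOf (c :: t) = true)) :
    splitRec ['\n','\n'] (c :: t) = (splitRec ['\n','\n'] t).modifyHead (c :: ·) := by
  rw [splitRec, if_neg h]

-- ===== snoc lemmas for the line splitter =====
theorem splitRec_nl_snoc_nl (E : List Char) :
    splitRec ['\n'] (E ++ ['\n']) = splitRec ['\n'] E ++ [[]] := by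
  induction E with
  | nil => simp only [List.nil_append]; rw [splitRec_nl_cons_nl, splitRec_nl_nil]; rfl
  | cons e E' ih =>
    by_cases he : e = '\n'
    · subst he
      rw [List.cons_append, splitRec_nl_cons_nl, splitRec_nl_cons_nl, ih]
      simp
    · rw [List.cons_append, splitRec_nl_cons e _ he, splitRec_nl_cons e _ he, ih,
        MH_append _ _ _ (splitRec_ne_nil _ _)]

theorem splitRec_nl_snoc (E : List Char) (c : Char) (h : c ≠ '\n') :
    splitRec ['\n'] (E ++ [c]) =
      (splitRec ['\n'] E).dropLast ++ [(splitRec ['\n'] E).getLastD [] ++ [c]] := by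
  induction E with
  | nil =>
    simp only [List.nil_append]
    rw [splitRec_nl_cons c _ h, splitRec_nl_nil]
    rfl
  | cons e E' ih =>
    by_cases he : e = '\n'
    · subst he
      rw [List.cons_append, splitRec_nl_cons_nl, splitRec_nl_cons_nl, ih]
      have hne := splitRec_ne_nil ['\n'] E'
      cases hsp : splitRec ['\n'] E' with
      | nil => exact absurd hsp hne
      | cons x rest => cases rest <;> simp
    · rw [List.cons_append, splitRec_nl_cons e _ he, splitRec_nl_cons e _ he, ih]
      have hne := splitRec_ne_nil ['\n'] E'
      cases hsp : splitRec ['\n'] E' with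
      | nil => exact absurd hsp hne
      | cons x rest => cases rest <;> simp

-- φ-snoc corollaries
theorem preF_nil : preF [] = [] := by rw [preF, splitRec_nl_nil]; rfl
theorem lastL_nil : lastL [] = [] := by rw [lastL, splitRec_nl_nil]; rfl

theorem preF_snoc_nl (E : List Char) :
    preF (E ++ ['\n']) = preF E ++ (dF (lastL E)).toList := by
  rw [preF, splitRec_nl_snoc_nl, List.dropLast_concat,
    FM_last dF _ [] (splitRec_ne_nil _ _), preF, lastL]

theorem lastL_snoc_nl (E : List Char) : lastL (E ++ ['\n']) = [] := by
  rw [lastL, splitRec_nl_snoc_nl]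
  simp

theorem preF_snoc (E : List Char) (c : Char) (h : c ≠ '\n') :
    preF (E ++ [c]) = preF E := by
  rw [preF, splitRec_nl_snoc E c h, List.dropLast_concat, preF]

theorem lastL_snoc (E : List Char) (c : Char) (h : c ≠ '\n') :
    lastL (E ++ [c]) = lastL E ++ [c] := by
  rw [lastL, splitRec_nl_snoc E c h, lastL]
  simp

theorem frags_decomp (E : List Char) :
    frags E = preF E ++ (dF (lastL E)).toList := by
  rw [frags, FM_last dF _ [] (splitRec_ne_nil _ _), preF, lastL]

theorem frags_nil : frags [] = [] := by rw [frags, splitRec_nl_nil]; rfl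

-- ===== whitespace and strip facts =====
theorem dF_nil : dF [] = none := by rfl

theorem push_nil (p : List (List Char)) : push p [] = p := by
  simp [push, PySem.Chars.join, List.intercalate]

theorem strip_cons_ws (a : Char) (l : List Char) (ha : PySem.Chars.isspace a = true) :
    PySem.Chars.strip (a :: l) = PySem.Chars.strip l := by
  simp [PySem.Chars.strip, PySem.Chars.lstrip, ha]

theorem rstrip_snoc_ws (a : Char) (l : List Char) (ha : PySem.Chars.isspace a = true) :
    PySem.Chars.rstrip (l ++ [a]) = PySem.Chars.rstrip l := by
  simp [PySem.Chars.rstrip, ha]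

theorem strip_snoc_ws (a : Char) (l : List Char) (ha : PySem.Chars.isspace a = true) :
    PySem.Chars.strip (l ++ [a]) = PySem.Chars.strip l := by
  rw [PySem.Chars.strip, PySem.Chars.strip, PySem.Chars.lstrip, PySem.Chars.lstrip,
    List.dropWhile_append]
  by_cases he : (List.dropWhile PySem.Chars.isspace l).isEmpty
  · rw [if_pos he]
    simp only [List.isEmpty_iff] at he
    rw [he]
    simp [ha, PySem.Chars.rstrip]
  · rw [if_neg he]
    exact rstrip_snoc_ws a _ ha

theorem dF_cons_ws (a : Char) (l : List Char) (ha : PySem.Chars.isspace a = true) :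
    dF (a :: l) = dF l := by
  rw [dF, dF, strip_cons_ws a l ha]

theorem dF_snoc_ws (a : Char) (l : List Char) (ha : PySem.Chars.isspace a = true) :
    dF (l ++ [a]) = dF l := by
  rw [dF, dF, strip_snoc_ws a l ha]

theorem frags_ws_prepend (w x : List Char) (hw : ∀ a ∈ w, PySem.Chars.isspace a = true) :
    frags (w ++ x) = frags x := by
  induction w with
  | nil => simp
  | cons a w' ih =>
    have ha : PySem.Chars.isspace a = true := hw a (by simp)
    have ih' := ih (fun b hb => hw b (by simp [hb]))
    rw [List.cons_append]
    by_cases hn : a = '\n'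
    · subst hn
      rw [frags, splitRec_nl_cons_nl, List.filterMap_cons, dF_nil, ← frags, ih']
    · rw [frags, splitRec_nl_cons a _ hn]
      cases hsp : splitRec ['\n'] (w' ++ x) with
      | nil => exact absurd hsp (splitRec_ne_nil _ _)
      | cons hd tl =>
        simp only [List.modifyHead, List.filterMap_cons, dF_cons_ws a hd ha]
        rw [← List.filterMap_cons, ← hsp, ← frags, ih']

theorem frags_snoc_ws (x : List Char) (a : Char) (ha : PySem.Chars.isspace a = true) :
    frags (x ++ [a]) = frags x := by
  by_cases hn : a = '\n'
  · subst hn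
    rw [frags, splitRec_nl_snoc_nl, List.filterMap_append, ← frags]
    simp [dF_nil]
  · rw [frags, splitRec_nl_snoc x a hn, List.filterMap_append, frags_decomp, preF, lastL,
      List.filterMap_cons, dF_snoc_ws _ _ ha]
    cases dF ((splitRec ['\n'] x).getLastD []) <;> simp

theorem frags_ws_append (w : List Char) (hw : ∀ a ∈ w, PySem.Chars.isspace a = true) :
    ∀ x, frags (x ++ w) = frags x := by
  induction w with
  | nil => simp
  | cons a w' ih =>
    intro x
    have ha : PySem.Chars.isspace a = true := hw a (by simp)
    have hcw : x ++ a :: w' = (x ++ [a]) ++ w' := by simp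
    rw [hcw, ih (fun b hb => hw b (by simp [hb])) (x ++ [a]), frags_snoc_ws x a ha]

theorem mem_takeWhile_ws (p : Char → Bool) :
    ∀ (l : List Char) (a : Char), a ∈ List.takeWhile p l → p a = true := by
  intro l
  induction l with
  | nil => intro a h; simp [List.takeWhile] at h
  | cons b t ih =>
    intro a h
    rw [List.takeWhile_cons] at h
    by_cases hb : p b
    · rw [if_pos hb] at h
      rcases List.mem_cons.mp h with h1 | h2
      · subst h1; exact hb
      · exact ih a h2
    · rw [if_neg hb] at h; simp at h

theorem frags_strip (E : List Char) :
    frags (PySem.Chars.strip E) = frags E := by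
  have h1 : frags E = frags (PySem.Chars.lstrip E) := by
    have h0 := frags_ws_prepend (List.takeWhile PySem.Chars.isspace E)
      (List.dropWhile PySem.Chars.isspace E) (fun a ha => mem_takeWhile_ws _ _ a ha)
    rw [List.takeWhile_append_dropWhile] at h0
    exact h0.symm ▸ rfl
  have h2 : ∀ z : List Char, frags z = frags (PySem.Chars.rstrip z) := by
    intro z
    have hzz : z = PySem.Chars.rstrip z ++ (List.takeWhile PySem.Chars.isspace z.reverse).reverse := by
      rw [PySem.Chars.rstrip, ← List.reverse_append, List.takeWhile_append_dropWhile,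
        List.reverse_reverse]
    have h3 := frags_ws_append (List.takeWhile PySem.Chars.isspace z.reverse).reverse
      (fun a ha => mem_takeWhile_ws _ _ a (List.mem_reverse.mp ha)) (PySem.Chars.rstrip z)
    rw [← hzz] at h3
    exact hzz ▸ h3
  rw [PySem.Chars.strip]
  exact ((h1.trans (h2 _)).symm)

-- ===== the A-side event body computes push/frags =====
theorem FM_if {α β : Type} (p : α → Bool) (g : α → β) (L : List α) :
    L.filterMap (fun a => if p a then some (g a) else none) = (L.filter p).map g := by
  induction L with
  | nil => rfl
  | cons a t ih =>
    rw [List.filterMap_cons, List.filter_cons]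
    by_cases hp : p a
    · rw [if_pos hp, if_pos hp, List.map_cons, ih]
    · rw [if_neg hp, if_neg hp, ih]

theorem frags_as_filter (e : List Char) :
    frags e = ((splitRec ['\n'] e).filter
        (fun line => PySem.Chars.startswith (PySem.Chars.strip line) ['d','a','t','a',':'])).map
      (fun line => PySem.Chars.strip (PySem.Chars.slice (PySem.Chars.strip line) (some 5) none)) := by
  rw [frags, ← FM_if]
  rfl

theorem evA_eq_push (p : List (List Char)) (E : List Char) :
    evA p E = push p (frags E) := by
  rw [evA, ← frags_strip E]
  simp only []
  rw [splitOn_eq_splitRec _ _ (by simp)]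
  by_cases h1 : PySem.Chars.strip E = []
  · rw [if_pos h1, h1, frags_nil, push_nil]
  · rw [if_neg h1, frags_as_filter]
    by_cases h2 : ((splitRec ['\n'] (PySem.Chars.strip E)).filter
        (fun line => PySem.Chars.startswith (PySem.Chars.strip line) ['d','a','t','a',':'])) = []
    · rw [h2]
      simp [push, PySem.Chars.join, List.intercalate]
    · rw [if_neg (by simp [h2])]
      rw [List.map_map, push]
      rfl

-- ===== the B-side fold steps =====
theorem flushAlt_eq (p fr : List (List Char)) : sseFlushAlt (p, fr) = (push p fr, []) := by
  rw [sseFlushAlt, push]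

theorem stepAlt_nil (st : List (List Char) × List (List Char)) :
    sseStepAlt st [] = sseFlushAlt st := by
  rw [sseStepAlt, if_pos rfl]

theorem stepAlt_line (p fr : List (List Char)) (l : List Char) (h : l ≠ []) :
    sseStepAlt (p, fr) l = (p, fr ++ (dF l).toList) := by
  rw [sseStepAlt, if_neg h, dF]
  by_cases hc : PySem.Chars.startswith (PySem.Chars.strip l) ['d','a','t','a',':']
  · rw [if_pos hc, if_pos hc]
    rfl
  · rw [if_neg hc, if_neg hc]
    simp

theorem stepflush (p fr : List (List Char)) (l : List Char) :
    sseFlushAlt (sseStepAlt (p, fr) l) = (push p (fr ++ (dF l).toList), []) := by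
  by_cases h : l = []
  · subst h
    rw [stepAlt_nil, flushAlt_eq, flushAlt_eq, push_nil, dF_nil]
    simp
  · rw [stepAlt_line p fr l h, flushAlt_eq]

theorem MH_nil_append {α : Type} (l : List (List α)) :
    List.modifyHead (fun x => [] ++ x) l = l := by
  cases l <;> simp

theorem nl2_not_prefix_single (t : List Char) (ht : t.head? ≠ some '\n') :
    ¬ (['\n','\n'].isPrefixOf ('\n' :: t) = true) := by
  cases t with
  | nil => simp [List.isPrefixOf]
  | cons d t' =>
    have hd : d ≠ '\n' := by intro h; exact ht (by simp [h])
    simp [List.isPrefixOf]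
    exact fun hh => hd hh.symm

theorem nl2_not_prefix_c (c : Char) (t : List Char) (hc : c ≠ '\n') :
    ¬ (['\n','\n'].isPrefixOf (c :: t) = true) := by
  simp [List.isPrefixOf]
  intro hh
  exact absurd hh.symm hc

-- ===== the main simulation =====
theorem MAIN : ∀ (n : Nat) (s : List Char), s.length ≤ n → ∀ (p : List (List Char)) (E : List Char),
    (s.head? = some '\n' → lastL E = [] → preF E = []) →
    (sseFlushAlt (List.foldl sseStepAlt (p, preF E)
        ((splitRec ['\n'] s).modifyHead (fun x => lastL E ++ x)))).1 =
      List.foldl evA p ((splitRec ['\n','\n'] s).modifyHead (fun x => E ++ x)) := by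
  intro n
  induction n with
  | zero =>
    intro s hs p E _
    have hs0 : s = [] := by cases s with | nil => rfl | cons a t => simp at hs
    subst hs0
    rw [splitRec_nl_nil, splitRec_nl2_nil]
    simp only [List.modifyHead, List.foldl_cons, List.foldl_nil, List.append_nil]
    rw [stepflush, evA_eq_push p E, frags_decomp]
  | succ n ih =>
    intro s hs p E hy
    cases s with
    | nil =>
      rw [splitRec_nl_nil, splitRec_nl2_nil]
      simp only [List.modifyHead, List.foldl_cons, List.foldl_nil, List.append_nil]
      rw [stepflush, evA_eq_push p E, frags_decomp]
    | cons c t =>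
      by_cases hc : c = '\n'
      · subst hc
        -- is the next char also a newline?
        by_cases ht : t.head? = some '\n'
        · -- event boundary "\n\n"
          obtain ⟨t', rfl⟩ : ∃ t', t = '\n' :: t' := by
            cases t with
            | nil => simp at ht
            | cons d t' => exact ⟨t', by simp at ht; rw [ht]⟩
          rw [splitRec_nl_cons_nl, splitRec_nl_cons_nl, splitRec_nl2_cons2]
          simp only [List.modifyHead, List.foldl_cons, List.append_nil]
          have h1 : sseStepAlt (sseStepAlt (p, preF E) (lastL E)) [] =
              (evA p E, ([] : List (List Char))) := by
            rw [stepAlt_nil, stepflush, evA_eq_push p E, frags_decomp]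
          rw [h1]
          have := ih t' (by simp at hs; omega) (evA p E) []
            (fun _ h => preF_nil)
          rw [preF_nil, lastL_nil] at this
          rw [MH_nil_append] at this
          rw [MH_nil_append] at this
          exact this
        · -- single newline: line boundary inside the current event
          rw [splitRec_nl_cons_nl,
            splitRec_nl2_cons '\n' t (nl2_not_prefix_single t ht), MH_comp]
          simp only [List.modifyHead_cons, List.foldl_cons, List.append_nil]
          have hstep : sseStepAlt (p, preF E) (lastL E) = (p, preF (E ++ ['\n'])) := by
            by_cases hE : lastL E = []
            · rw [hE, stepAlt_nil, flushAlt_eq, hy rfl hE, push_nil, preF_snoc_nl, hy rfl hE, hE,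
                dF_nil]
              rfl
            · rw [stepAlt_line p _ _ hE, preF_snoc_nl]
          rw [hstep]
          have hmh : (fun x => E ++ '\n' :: x) = (fun x => (E ++ ['\n']) ++ x) := by
            funext x
            simp
          rw [hmh]
          have := ih t (by simp at hs; omega) p (E ++ ['\n'])
            (fun hh _ => absurd hh ht)
          rw [lastL_snoc_nl] at this
          rw [MH_nil_append] at this
          exact this
      · -- ordinary character: extend the current line / event
        rw [splitRec_nl_cons c t hc, splitRec_nl2_cons c t (nl2_not_prefix_c c t hc),
          MH_comp, MH_comp]
        have hmh1 : (fun x => lastL E ++ c :: x) = (fun x => lastL (E ++ [c]) ++ x) := by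
          funext x
          rw [lastL_snoc E c hc]
          simp
        have hmh2 : (fun x => E ++ c :: x) = (fun x => (E ++ [c]) ++ x) := by
          funext x
          simp
        rw [hmh1, hmh2, ← preF_snoc E c hc]
        have := ih t (by simp at hs; omega) p (E ++ [c])
          (fun _ hl => absurd hl (by rw [lastL_snoc E c hc]; simp))
        exact this

theorem core (cs : List Char) :
    ((PySem.Chars.splitOn cs ['\n','\n']).foldl evA []).map String.ofList =
      ((sseFlushAlt ((PySem.Chars.splitOn cs ['\n']).foldl sseStepAlt ([], []))).1).map
        String.ofList := by
  have h := MAIN cs.length cs (Nat.le_refl _) [] [] (fun _ _ => preF_nil)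
  rw [preF_nil, lastL_nil, MH_nil_append, MH_nil_append] at h
  rw [splitOn_eq_splitRec cs ['\n','\n'] (by simp), splitOn_eq_splitRec cs ['\n'] (by simp),
    ← h]

theorem ports_eq (chunk : String) :
    iter_sse_data_payloads_py chunk = iter_sse_data_payloads_py_alt chunk := by
  show ((PySem.Chars.splitOn (PySem.Chars.replace chunk.toList ['\r','\n'] ['\n'])
      ['\n','\n']).foldl evA []).map String.ofList = _
  rw [core]
  rfl

-- ===== VERDICT (by name: the statement is the Claim_ definition above) =====
theorem iter_sse_data_payloads_py_spec : Claim_equal_iter_sse_data_payloads_py := by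
  intro chunk _
  show iter_sse_data_payloads_py chunk = iter_sse_data_payloads_py_alt chunk
  exact ports_eq chunk
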